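-- pv_equiv track=rewrite | github.com/BitBloomTech/spawn | multiwindcalc/specification/combinators.py | zip_properties
-- ===== SOURCE A (Python) =====
-- def zip_properties(value):
--     """Combines properties by zipping the values provided
--
--     Parameters
--     ----------
--     value : dict
--         Mapping of properties to lists of values
--
--     Returns
--     -------
--     result : list of dict
--         List of combined properties
--     """
--     if not isinstance(value, dict):
--         raise TypeError('value {} must be of type dict, but was {}'.format(value, type(value)))
--     if not value:
--         raise ValueError('value is empty')
--     if not all(isinstance(v, list) for v in value.values()):
--         raise ValueError('value {} must have all list values'.format(value))
--     values_list = list(value.values())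
--     if not all(len(l) == len(values_list[0]) for l in values_list):
--         raise ValueError('all lists in value {} were not the same length'.format(value))
--     return [{k: v for k, v in zip(value.keys(), values)} for values in zip(*values_list)]
-- ===== SOURCE B (Python) =====
-- def zip_properties(value):
--     """Combines properties by zipping the values provided.
--
--     Consumes the columns as stacks: each value list is copied reversed once,
--     then rows are produced by popping one element off every stack until the
--     stacks are empty."""
--     if not isinstance(value, dict):
--         raise TypeError('value {} must be of type dict, but was {}'.format(value, type(value)))
--     if not value:
--         raise ValueError('value is empty')
--     if not all(isinstance(v, list) for v in value.values()):
--         raise ValueError('value {} must have all list values'.format(value))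
--     values_list = list(value.values())
--     if not all(len(l) == len(values_list[0]) for l in values_list):
--         raise ValueError('all lists in value {} were not the same length'.format(value))
--     stacks = [(k, list(reversed(col))) for k, col in value.items()]
--     result = []
--     while stacks[0][1]:
--         result.append({k: col.pop() for k, col in stacks})
--     return result
-- ===== Notes on version B (the rewrite author's own statement) =====
-- stated objective: alternative
-- what changed: After identical validation B copies each value list reversed into a stack and builds each row by popping one element off every stack until they are empty, instead of A's zip(*) row comprehension.
import Mathlib
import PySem

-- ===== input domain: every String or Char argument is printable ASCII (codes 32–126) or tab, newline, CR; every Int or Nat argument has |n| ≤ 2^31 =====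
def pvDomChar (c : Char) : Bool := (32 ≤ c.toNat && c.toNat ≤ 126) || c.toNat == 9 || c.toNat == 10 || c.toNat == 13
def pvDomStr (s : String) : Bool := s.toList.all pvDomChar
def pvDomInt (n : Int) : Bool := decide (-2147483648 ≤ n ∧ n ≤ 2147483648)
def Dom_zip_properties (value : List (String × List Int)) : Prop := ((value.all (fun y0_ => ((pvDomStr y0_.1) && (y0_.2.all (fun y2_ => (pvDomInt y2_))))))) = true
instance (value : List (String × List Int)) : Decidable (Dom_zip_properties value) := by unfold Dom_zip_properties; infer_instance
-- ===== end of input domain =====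

-- B consumes the columns as reversed cols, popping one element off every stack per row, instead of A's zip(*) comprehension; same cost, different mechanism. Pre_ excludes the inputs where A raises (empty dict, unequal lengths) and duplicate keys (no dict input).


-- ===== PORT A =====
-- zip(*values_list): row i is [l[i] for l in ls], for i below the minimum length.
def pyZipStar (ls : List (List Int)) : List (List Int) :=
  match ls with
  | [] => []
  | l :: rest =>
    let n := rest.foldl (fun m l' => min m l'.length) l.length
    (List.range n).map (fun i => (l :: rest).map (fun l' => l'.getD i 0))

-- {k: v for k, v in zip(value.keys(), values)}: with the dict's keys distinct
-- (guaranteed for any Python dict input), the comprehension is exactly List.zip.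
def zip_properties (value : List (String × List Int)) : List (List (String × Int)) :=
  let values_list := value.map (·.2)
  (pyZipStar values_list).map (fun vs => (value.map (·.1)).zip vs)

-- ===== PORT B =====
-- while cols[0][1]: result.append({k: col.pop() for k, col in cols})
-- col.pop() = take the last element and drop it; stops when the first stack is empty.
def popRows (cols : List (String × List Int)) : List (List (String × Int)) :=
  match cols with
  | [] => []
  | (k0, c0) :: rest =>
    if c0 = [] then []
    else
      (((k0, c0) :: rest).map (fun kc => (kc.1, kc.2.getLast?.getD 0))) ::
        popRows (((k0, c0) :: rest).map (fun kc => (kc.1, kc.2.dropLast)))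
termination_by (cols.head?.elim 0 (fun p => p.2.length) : Nat)
decreasing_by
  simp_all [List.length_dropLast]
  cases c0 with
  | nil => simp_all
  | cons a t => simp

-- cols = [(k, list(reversed(col))) for k, col in value.items()]; then pop rows.
def zip_properties_alt (value : List (String × List Int)) : List (List (String × Int)) :=
  popRows (value.map (fun kv => (kv.1, kv.2.reverse)))

-- ===== PRECONDITION & SPEC =====
-- Pre_ excludes: the empty dict and value-lists of differing lengths (A raises ValueError there),
-- and association lists with duplicate keys, which do not represent any Python dict input.
def Pre_zip_properties (value : List (String × List Int)) : Prop :=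
  value ≠ [] ∧ (value.map Prod.fst).Nodup ∧
    ∀ p ∈ value, p.2.length = (value.head?.elim 0 (fun q => q.2.length))
instance (value : List (String × List Int)) : Decidable (Pre_zip_properties value) := by
  unfold Pre_zip_properties; infer_instance

def pvWitness_zip_properties : (List (String × List Int)) := [("a", [1, 2]), ("b", [3, 4])]

def Spec_zip_properties (value : List (String × List Int)) (out : List (List (String × Int))) : Prop := out = zip_properties_alt value
instance (value : List (String × List Int)) (out : List (List (String × Int))) : Decidable (Spec_zip_properties value out) := by unfold Spec_zip_properties; infer_instance

-- ===== CLAIM (what is proved, stated in full; the proofs are below) =====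
def Claim_equal_zip_properties : Prop := ∀ (value : List (String × List Int)), Dom_zip_properties value → Pre_zip_properties value → Spec_zip_properties value (zip_properties value)

-- ===== LEMMAS AND PROOFS =====

-- the fold of min over all-equal lengths is that length
lemma foldl_min_const (l : List (List Int)) (n : Nat) (h : ∀ x ∈ l, x.length = n) :
    l.foldl (fun m l' => min m l'.length) n = n := by
  induction l with
  | nil => rfl
  | cons x xs ih =>
    simp only [List.foldl_cons, h x (by simp), min_self]
    exact ih (fun y hy => h y (by simp [hy]))

-- the canonical transpose both ports compute
def canon (value : List (String × List Int)) (n : Nat) : List (List (String × Int)) :=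
  (List.range n).map (fun i => value.map (fun kv => (kv.1, kv.2.getD i 0)))

lemma portA_canon (value : List (String × List Int)) (n : Nat)
    (hne : value ≠ []) (hlen : ∀ p ∈ value, p.2.length = n) :
    zip_properties value = canon value n := by
  match value, hne with
  | (k0, vs0) :: rest, _ =>
    have h0 : vs0.length = n := hlen (k0, vs0) (by simp)
    have hmin : (rest.map (·.2)).foldl (fun m l' => min m l'.length) vs0.length = n := by
      rw [h0]; apply foldl_min_const
      intro x hx
      obtain ⟨p, hp, rfl⟩ := List.mem_map.mp hx
      exact hlen p (by simp [hp])
    simp only [zip_properties, pyZipStar, List.map_cons, hmin]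
    unfold canon
    simp only [List.map_map]
    apply List.map_congr_left
    intro i _
    simp only [Function.comp, List.map_cons, List.zip_cons_cons, List.zip_map']

lemma popRows_rev (n : Nat) : ∀ (value : List (String × List Int)), value ≠ [] →
    (∀ p ∈ value, p.2.length = n) →
    popRows (value.map (fun kv => (kv.1, kv.2.reverse))) = canon value n := by
  induction n with
  | zero =>
    intro value hne hlen
    match value, hne with
    | (k0, vs0) :: rest, _ =>
      have h0 : vs0 = [] := List.eq_nil_of_length_eq_zero (hlen (k0, vs0) (by simp))
      subst h0
      simp [popRows, canon]
  | succ n ih =>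
    intro value hne hlen
    match value, hne with
    | (k0, vs0) :: rest, _ =>
      have h0 : vs0.length = n + 1 := hlen (k0, vs0) (by simp)
      have hrev : vs0.reverse ≠ [] := by
        intro h; rw [← List.length_eq_zero_iff, List.length_reverse, h0] at h; omega
      have hrow : ((k0, vs0) :: rest).map
            ((fun kc : String × List Int => (kc.1, kc.2.getLast?.getD 0)) ∘
              (fun kv => (kv.1, kv.2.reverse)))
          = ((k0, vs0) :: rest).map (fun kv => (kv.1, kv.2.getD 0 0)) := by
        apply List.map_congr_left
        intro p hp
        have hl : p.2.length = n + 1 := hlen p hp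
        match p, hl with
        | (k, v :: t), _ => simp [Function.comp, List.getD]
      have harg : ((k0, vs0) :: rest).map
            ((fun kc : String × List Int => (kc.1, kc.2.dropLast)) ∘
              (fun kv => (kv.1, kv.2.reverse)))
          = (((k0, vs0) :: rest).map (fun kv => (kv.1, kv.2.tail))).map
              (fun kv => (kv.1, kv.2.reverse)) := by
        rw [List.map_map]
        apply List.map_congr_left
        intro p _
        simp [Function.comp]
      have htail : ∀ p ∈ ((k0, vs0) :: rest).map (fun kv => (kv.1, kv.2.tail)),
          p.2.length = n := by
        intro p hp
        obtain ⟨q, hq, rfl⟩ := List.mem_map.mp hp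
        have := hlen q hq
        simp only [List.length_tail, this]
        omega
      show popRows ((k0, vs0.reverse) :: rest.map (fun kv => (kv.1, kv.2.reverse)))
          = canon ((k0, vs0) :: rest) (n + 1)
      rw [popRows, if_neg hrev]
      rw [show ((k0, vs0.reverse) :: rest.map (fun kv => (kv.1, kv.2.reverse)))
            = ((k0, vs0) :: rest).map (fun kv => (kv.1, kv.2.reverse)) from rfl]
      rw [List.map_map, List.map_map, hrow, harg, ih _ (by simp) htail]
      unfold canon
      rw [List.range_succ_eq_map, List.map_cons]
      congr 1
      rw [List.map_map]
      apply List.map_congr_left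
      intro i _
      simp only [Function.comp, List.map_map]
      apply List.map_congr_left
      intro p _
      simp

lemma portB_canon (value : List (String × List Int)) (n : Nat)
    (hne : value ≠ []) (hlen : ∀ p ∈ value, p.2.length = n) :
    zip_properties_alt value = canon value n := by
  unfold zip_properties_alt
  exact popRows_rev n value hne hlen

-- ===== VERDICT (by name: the statement is the Claim_ definition above) =====
theorem zip_properties_spec : Claim_equal_zip_properties := by
  intro value _ hpre
  obtain ⟨hne, _, hlen⟩ := hpre
  unfold Spec_zip_properties
  rw [portA_canon value _ hne hlen, portB_canon value _ hne hlen]
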